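-- pv_equiv track=rewrite | github.com/theturboturnip/turnip_text | python/turnip_text/render/pandoc/__init__.py | generic_join
-- ===== SOURCE A (Python) =====
-- from typing import (
--     Any,
--     Callable,
--     Dict,
--     Generic,
--     Iterable,
--     List,
--     Optional,
--     Self,
--     Sequence,
--     Tuple,
--     Type,
--     TypeVar,
--     Union,
-- )
--
-- T = TypeVar("T")
--
-- def generic_join(ts: Sequence[T], joiner: T) -> List[T]:
--     first = True
--     items = []
--     for t in ts:
--         if not first:
--             items.append(joiner)
--         items.append(t)
--         first = False
--     return items
-- ===== SOURCE B (Python) =====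
-- def generic_join(ts, joiner):
--     # Closed-form construction by index: the result has 2*len(ts)-1 slots;
--     # odd positions hold the joiner, even position i holds ts[i // 2].
--     n = len(ts)
--     return [joiner if i % 2 else ts[i // 2] for i in range(2 * n - 1)]
-- ===== Notes on version B (the rewrite author's own statement) =====
-- stated objective: alternative
-- what changed: Replaces A's accumulate-with-first-flag loop over the elements by a closed-form construction over output positions: the result has 2*n-1 slots, odd indices get the joiner and even index i gets ts[i//2].
import Mathlib
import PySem

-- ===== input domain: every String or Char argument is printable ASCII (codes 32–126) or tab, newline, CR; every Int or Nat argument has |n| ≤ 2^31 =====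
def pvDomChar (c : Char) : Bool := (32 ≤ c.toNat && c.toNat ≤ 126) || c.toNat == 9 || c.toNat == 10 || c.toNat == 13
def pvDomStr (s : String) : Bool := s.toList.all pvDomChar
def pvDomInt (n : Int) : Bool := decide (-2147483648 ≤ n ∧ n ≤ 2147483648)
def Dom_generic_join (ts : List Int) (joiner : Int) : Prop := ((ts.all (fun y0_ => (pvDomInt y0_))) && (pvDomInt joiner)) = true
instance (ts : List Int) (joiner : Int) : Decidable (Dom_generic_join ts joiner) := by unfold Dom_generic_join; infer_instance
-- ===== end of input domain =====

-- B replaces A's accumulate-with-first-flag loop by a closed-form construction over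
-- output positions (2*n-1 slots; odd index -> joiner, even index i -> ts[i//2]); objective: alternative.


-- ===== PORT A =====
-- loop state: (first, items); if not first append joiner, then append t
def generic_join (ts : List Int) (joiner : Int) : List Int :=
  (ts.foldl
    (fun (s : Bool × List Int) t =>
      (false, (if s.1 then s.2 else s.2 ++ [joiner]) ++ [t]))
    (true, [])).2

-- ===== PORT B =====
-- [joiner if i % 2 else ts[i // 2] for i in range(2 * n - 1)]
-- the index i // 2 is always < n, so the pyGetD default is never used
def generic_join_alt (ts : List Int) (joiner : Int) : List Int :=
  let n : Int := ts.length
  (PySem.List.pyRange 0 (2 * n - 1) 1).map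
    (fun i => if PySem.Int.mod i 2 ≠ 0 then joiner
              else PySem.List.pyGetD ts (PySem.Int.floordiv i 2) 0)

-- ===== PRECONDITION & SPEC =====
def Spec_generic_join (ts : List Int) (joiner : Int) (out : List Int) : Prop := out = generic_join_alt ts joiner
instance (ts : List Int) (joiner : Int) (out : List Int) : Decidable (Spec_generic_join ts joiner out) := by unfold Spec_generic_join; infer_instance

-- ===== CLAIM (what is proved, stated in full; the proofs are below) =====
def Claim_equal_generic_join : Prop := ∀ (ts : List Int) (joiner : Int), Dom_generic_join ts joiner → Spec_generic_join ts joiner (generic_join ts joiner)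

-- ===== LEMMAS AND PROOFS =====
-- once 'first' is false, A's loop simply appends joiner-element pairs
theorem generic_join_loop_false (ts : List Int) (joiner : Int) (items : List Int) :
    (ts.foldl
      (fun (s : Bool × List Int) t =>
        (false, (if s.1 then s.2 else s.2 ++ [joiner]) ++ [t]))
      (false, items)).2 = items ++ ts.flatMap (fun t => [joiner, t]) := by
  induction ts generalizing items with
  | nil => simp
  | cons t rest ih => simp [List.foldl_cons, ih]

-- B's index formula over the first 2*m+1 positions of (t :: ts) produces t followed by joiner-element pairs
theorem alt_index_formula (joiner : Int) (ts : List Int) (t : Int) :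
    (List.range (2 * ts.length + 1)).map
      (fun k : Nat => if (k % 2 : Nat) ≠ 0 then joiner else (t :: ts).getD (k / 2) 0)
      = t :: ts.flatMap (fun x => [joiner, x]) := by
  induction ts generalizing t with
  | nil => simp
  | cons r rest ih =>
    have h3 : 2 * (r :: rest).length + 1 = (2 * rest.length + 1) + 1 + 1 := by
      simp; omega
    rw [h3, List.range_succ_eq_map, List.range_succ_eq_map]
    simp only [List.map_cons, List.map_map]
    have hf : ((fun k : Nat => if (k % 2 : Nat) ≠ 0 then joiner else (t :: r :: rest).getD (k / 2) 0)
        ∘ ((· + 1) ∘ (· + 1)))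
        = (fun k : Nat => if (k % 2 : Nat) ≠ 0 then joiner else (r :: rest).getD (k / 2) 0) := by
      funext k
      have hm : (k + 1 + 1) % 2 = k % 2 := by omega
      have hd : (k + 1 + 1) / 2 = k / 2 + 1 := by omega
      simp [Function.comp, hm, hd]
    rw [hf, ih]
    simp

-- ===== VERDICT (by name: the statement is the Claim_ definition above) =====
theorem generic_join_spec : Claim_equal_generic_join := by
  intro ts joiner _
  unfold Spec_generic_join generic_join generic_join_alt
  cases ts with
  | nil => rfl
  | cons t rest =>
    -- A side
    rw [List.foldl_cons]
    simp only [if_pos, List.nil_append]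
    rw [generic_join_loop_false]
    -- B side
    have hlen : (2 * ((t :: rest).length : Int) - 1) = ((2 * rest.length + 1 : Nat) : Int) := by
      simp; omega
    rw [hlen, PySem.List.pyRange_zero_natCast, List.map_map]
    have hf : ((fun i : Int => if PySem.Int.mod i 2 ≠ 0 then joiner
                else PySem.List.pyGetD (t :: rest) (PySem.Int.floordiv i 2) 0) ∘ (Nat.cast))
        = (fun k : Nat => if (k % 2 : Nat) ≠ 0 then joiner else (t :: rest).getD (k / 2) 0) := by
      funext k
      simp only [Function.comp]
      have hm : PySem.Int.mod (↑k) 2 = ((k % 2 : Nat) : Int) := by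
        rw [PySem.Int.mod_eq_emod_of_pos (by norm_num)]; omega
      have hd : PySem.Int.floordiv (↑k) 2 = ((k / 2 : Nat) : Int) := by
        rw [PySem.Int.floordiv_eq_ediv_of_pos (by norm_num)]; omega
      rw [hm, hd, PySem.List.pyGetD_natCast]
      have hc : (((k : Int)) % 2 = 1) ↔ ((k % 2 : Nat) = 1) := by omega
      simp [hc]
    rw [hf, alt_index_formula]
    simp
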